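-- pv_equiv track=rewrite | github.com/Pamir-AI/esp32-agent-example | tools/led_matrix_viz.py | map_input_to_xy
-- ===== SOURCE A (Python) =====
-- from typing import Iterable, List, Optional, Sequence, Tuple
--
-- RGB = Tuple[int, int, int]
--
-- def idx_xy_to_linear(x: int, y: int, w: int, serpentine: bool) -> int:
--     if serpentine and (y % 2 == 1):
--         return y * w + (w - 1 - x)
--     return y * w + x
--
-- def map_input_to_xy(
--     tokens: List[RGB], w: int, h: int, input_order: str, wiring: str
-- ) -> List[RGB]:
--     if input_order == "xy":
--         return tokens
--     # input_order == "led": convert physical strip order to xy order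
--     serp = wiring == "serpentine"
--     out: List[RGB] = [(0, 0, 0)] * (w * h)
--     # LED index increases left->right for even rows; reverse for odd rows (serpentine)
--     for y in range(h):
--         for x in range(w):
--             src_idx = idx_xy_to_linear(x, y, w, serp)
--             dst_idx = y * w + x
--             if 0 <= src_idx < len(tokens):
--                 out[dst_idx] = tokens[src_idx]
--     return out
-- ===== SOURCE B (Python) =====
-- def map_input_to_xy(tokens, w, h, input_order, wiring):
--     if input_order == "xy":
--         return tokens
--     # input_order == "led": pad the strip to grid size, cut it into rows,
--     # and flip every odd row when the wiring is serpentine.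
--     if w <= 0 or h <= 0:
--         return [(0, 0, 0)] * (w * h)
--     pad = tokens[: w * h] + [(0, 0, 0)] * (w * h - len(tokens))
--     if wiring != "serpentine":
--         return pad
--     out = []
--     for y in range(h):
--         row = pad[y * w : (y + 1) * w]
--         out += list(reversed(row)) if y % 2 else row
--     return out
-- ===== Notes on version B (the rewrite author's own statement) =====
-- stated objective: alternative
-- what changed: A scatter-writes a preallocated buffer with nested loops computing a serpentine source index per cell; B never computes per-cell indices: it pads the strip to grid size with one slice+replicate, and for serpentine wiring cuts it into w-sized rows and reverses every odd row, concatenating them.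
import Mathlib
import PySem

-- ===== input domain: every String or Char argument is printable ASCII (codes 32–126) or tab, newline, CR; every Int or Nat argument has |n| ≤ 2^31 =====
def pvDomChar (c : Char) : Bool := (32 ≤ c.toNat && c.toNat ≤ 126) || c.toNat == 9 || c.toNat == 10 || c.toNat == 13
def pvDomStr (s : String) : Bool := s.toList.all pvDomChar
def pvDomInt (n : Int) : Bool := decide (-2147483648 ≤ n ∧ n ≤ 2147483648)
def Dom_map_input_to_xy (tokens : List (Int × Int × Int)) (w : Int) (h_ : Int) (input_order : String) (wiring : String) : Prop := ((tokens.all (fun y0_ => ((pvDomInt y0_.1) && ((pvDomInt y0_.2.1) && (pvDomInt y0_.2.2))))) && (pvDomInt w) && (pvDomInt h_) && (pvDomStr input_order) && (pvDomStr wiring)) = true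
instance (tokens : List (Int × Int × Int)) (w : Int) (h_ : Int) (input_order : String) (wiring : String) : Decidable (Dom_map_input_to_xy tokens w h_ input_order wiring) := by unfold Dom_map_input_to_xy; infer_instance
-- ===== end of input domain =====

-- B replaces A's per-cell serpentine index arithmetic over a preallocated scatter buffer
-- by pad-to-grid-size, cut into rows, reverse odd rows (objective: alternative, same cost).

-- ===== PORT A =====
def idx_xy_to_linear (x : Int) (y : Int) (w : Int) (serpentine : Bool) : Int :=
  if serpentine && (PySem.Int.mod y 2 == 1) then y * w + (w - 1 - x)
  else y * w + x

-- literal port of A; the write 'out[dst_idx] = …' only happens with 0 ≤ dst_idx < len(out),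
-- so List.set is exact for Python's list assignment here.
def map_input_to_xy (tokens : List (Int × Int × Int)) (w : Int) (h_ : Int) (input_order : String) (wiring : String) : List (Int × Int × Int) :=
  if input_order == "xy" then tokens
  else
    let serp := wiring == "serpentine"
    let out : List (Int × Int × Int) := List.replicate (w * h_).toNat (0, 0, 0)
    (PySem.List.pyRange 0 h_ 1).foldl (fun out y =>
      (PySem.List.pyRange 0 w 1).foldl (fun out x =>
        let src_idx := idx_xy_to_linear x y w serp
        let dst_idx := y * w + x
        if 0 ≤ src_idx ∧ src_idx < (tokens.length : Int) then
          out.set dst_idx.toNat ((PySem.List.pyGet? tokens src_idx).getD (0, 0, 0))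
        else out) out) out

-- ===== PORT B =====
def map_input_to_xy_alt (tokens : List (Int × Int × Int)) (w : Int) (h_ : Int) (input_order : String) (wiring : String) : List (Int × Int × Int) :=
  if input_order == "xy" then tokens
  else if w ≤ 0 ∨ h_ ≤ 0 then List.replicate (w * h_).toNat (0, 0, 0)
  else
    let pad := PySem.List.slice tokens none (some (w * h_))
               ++ List.replicate (w * h_ - (tokens.length : Int)).toNat (0, 0, 0)
    if !(wiring == "serpentine") then pad
    else
      (PySem.List.pyRange 0 h_ 1).foldl (fun out y =>
        let row := PySem.List.slice pad (some (y * w)) (some ((y + 1) * w))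
        out ++ (if PySem.Int.mod y 2 == 1 then row.reverse else row)) []

-- ===== PRECONDITION & SPEC =====
def Spec_map_input_to_xy (tokens : List (Int × Int × Int)) (w : Int) (h_ : Int) (input_order : String) (wiring : String) (out : List (Int × Int × Int)) : Prop := out = map_input_to_xy_alt tokens w h_ input_order wiring
instance (tokens : List (Int × Int × Int)) (w : Int) (h_ : Int) (input_order : String) (wiring : String) (out : List (Int × Int × Int)) : Decidable (Spec_map_input_to_xy tokens w h_ input_order wiring out) := by unfold Spec_map_input_to_xy; infer_instance

-- ===== CLAIM (what is proved, stated in full; the proofs are below) =====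
def Claim_equal_map_input_to_xy : Prop := ∀ (tokens : List (Int × Int × Int)) (w : Int) (h_ : Int) (input_order : String) (wiring : String), Dom_map_input_to_xy tokens w h_ input_order wiring → Spec_map_input_to_xy tokens w h_ input_order wiring (map_input_to_xy tokens w h_ input_order wiring)

-- ===== LEMMAS AND PROOFS =====

-- the cell value both programs ultimately place at destination index d (w > 0)
def pvGval (tokens : List (Int × Int × Int)) (w : Int) (serp : Bool) (d : Int) : Int × Int × Int :=
  let y := PySem.Int.floordiv d w
  let x := PySem.Int.mod d w
  let s := if serp && (PySem.Int.mod y 2 == 1) then y * w + (w - 1 - x) else d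
  if s < (tokens.length : Int) then (PySem.List.pyGet? tokens s).getD (0, 0, 0) else (0, 0, 0)

-- the element at index e of B's padded strip
def pvPadv (tokens : List (Int × Int × Int)) (e : Int) : Int × Int × Int :=
  if e < (tokens.length : Int) then (PySem.List.pyGet? tokens e).getD (0, 0, 0) else (0, 0, 0)

-- A's inner-loop body at row y, as a function of the column x
def pvInner (tokens : List (Int × Int × Int)) (w : Int) (serp : Bool) (y : Int)
    (out : List (Int × Int × Int)) (x : Int) : List (Int × Int × Int) :=
  let src_idx := idx_xy_to_linear x y w serp
  let dst_idx := y * w + x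
  if 0 ≤ src_idx ∧ src_idx < (tokens.length : Int) then
    out.set dst_idx.toNat ((PySem.List.pyGet? tokens src_idx).getD (0, 0, 0))
  else out

-- generic sequential-scatter lemma: writing cells a, a+1, …, b-1 in order into
-- 'pref ++ replicate m dflt' (pref already holding cells 0..a-1) just extends pref.
lemma seq_write {α : Type} (C : Int → Prop) [DecidablePred C] (v : Int → α) (dflt : α) :
    ∀ (k : Nat) (a b : Int), 0 ≤ a → b - a = (k : Int) →
    ∀ (pref : List α) (m : Nat), pref.length = a.toNat → k ≤ m →
    (PySem.List.pyRange a b 1).foldl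
        (fun o d => if C d then o.set d.toNat (v d) else o) (pref ++ List.replicate m dflt)
    = (pref ++ (PySem.List.pyRange a b 1).map (fun d => if C d then v d else dflt))
        ++ List.replicate (m - k) dflt := by
  intro k
  induction k with
  | zero =>
    intro a b ha hb pref m hl hm
    rw [PySem.List.pyRange_one_eq_nil (by omega)]
    simp
  | succ k ih =>
    intro a b ha hb pref m hl hm
    rw [PySem.List.pyRange_one_cons (by omega)]
    have hm1 : m = (m - 1) + 1 := by omega
    rw [hm1, List.replicate_succ]
    simp only [List.foldl_cons]
    have hset : (if C a then (pref ++ dflt :: List.replicate (m-1) dflt).set a.toNat (v a)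
                 else (pref ++ dflt :: List.replicate (m-1) dflt))
        = (pref ++ [if C a then v a else dflt]) ++ List.replicate (m-1) dflt := by
      by_cases hc : C a <;> simp [hc, hl]
    rw [hset]
    have := ih (a+1) b (by omega) (by push_cast at hb ⊢; omega)
      (pref ++ [if C a then v a else dflt]) (m-1) (by simp [hl]; omega) (by omega)
    rw [this]
    simp [List.map_cons, List.append_assoc]

-- floordiv/mod of a destination index d lying in row Y
lemma divmod_row (w Y d : Int) (hw : 0 < w) (_hY : 0 ≤ Y) (hd1 : Y * w ≤ d) (hd2 : d < Y * w + w) :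
    PySem.Int.floordiv d w = Y ∧ PySem.Int.mod d w = d - Y * w := by
  have hx1 : 0 ≤ d - Y * w := by omega
  have hx2 : d - Y * w < w := by omega
  constructor
  · rw [PySem.Int.floordiv_eq_ediv_of_pos hw]
    have h1 : (d - Y * w + Y * w) / w = (d - Y * w) / w + Y := Int.add_mul_ediv_right _ _ (by omega)
    have h2 : (d - Y * w) / w = 0 := Int.ediv_eq_zero_of_lt hx1 hx2
    have h3 : d - Y * w + Y * w = d := by ring
    rw [h3] at h1; omega
  · rw [PySem.Int.mod_eq_emod_of_pos hw]
    have h1 : (d - Y * w + Y * w) % w = (d - Y * w) % w := Int.add_mul_emod_self_right _ _ _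
    have h2 : (d - Y * w) % w = d - Y * w := Int.emod_eq_of_lt hx1 hx2
    have h3 : d - Y * w + Y * w = d := by ring
    rw [h3] at h1; omega

-- the value A's conditional write computes for destination d in row Y equals pvGval d
lemma gval_row_eq (tokens : List (Int × Int × Int)) (w : Int) (serp : Bool) (hw : 0 < w)
    (Y d : Int) (hY : 0 ≤ Y) (hd1 : Y * w ≤ d) (hd2 : d < Y * w + w) :
    (if 0 ≤ idx_xy_to_linear (d - Y * w) Y w serp ∧
        idx_xy_to_linear (d - Y * w) Y w serp < (tokens.length : Int) then
       (PySem.List.pyGet? tokens (idx_xy_to_linear (d - Y * w) Y w serp)).getD (0, 0, 0)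
     else (0, 0, 0))
    = pvGval tokens w serp d := by
  obtain ⟨hdiv, hmod⟩ := divmod_row w Y d hw hY hd1 hd2
  simp only [pvGval, idx_xy_to_linear, hdiv, hmod]
  by_cases hs : (serp && (PySem.Int.mod Y 2 == 1)) = true
  · simp only [hs, if_true]
    have hpos : 0 ≤ Y * w + (w - 1 - (d - Y * w)) := by
      have := mul_nonneg hY hw.le
      omega
    split_ifs with h1 h2 h2 <;> try rfl
    · omega
    · omega
  · simp only [Bool.not_eq_true] at hs
    simp only [hs, Bool.false_eq_true, if_false]
    have h3 : Y * w + (d - Y * w) = d := by ring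
    rw [h3]
    have hd0 : 0 ≤ d := by
      have := mul_nonneg hY hw.le
      omega
    split_ifs with h1 h2 h2 <;> try rfl
    · omega
    · omega

-- pvGval in row Y, expressed through the padded strip
lemma gval_eq_padv (tokens : List (Int × Int × Int)) (w : Int) (serp : Bool) (hw : 0 < w)
    (Y d : Int) (hY : 0 ≤ Y) (hd1 : Y * w ≤ d) (hd2 : d < Y * w + w) :
    pvGval tokens w serp d
    = if serp && (PySem.Int.mod Y 2 == 1) then pvPadv tokens (Y * w + (w - 1 - (d - Y * w)))
      else pvPadv tokens d := by
  obtain ⟨hdiv, hmod⟩ := divmod_row w Y d hw hY hd1 hd2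
  simp only [pvGval, pvPadv, hdiv, hmod]
  by_cases hs : (serp && (PySem.Int.mod Y 2 == 1)) = true
  · simp only [hs, if_true]
  · simp only [Bool.not_eq_true] at hs
    simp only [hs, Bool.false_eq_true, if_false]

-- one row of A's nested loop, rewritten as a sequential scatter over destinations
lemma row_eq (tokens : List (Int × Int × Int)) (w : Int) (serp : Bool) (hw : 0 < w)
    (Y : Int) (hY : 0 ≤ Y) (pref : List (Int × Int × Int)) (m : Nat)
    (hl : pref.length = (Y * w).toNat) (hm : w.toNat ≤ m) :
    (PySem.List.pyRange 0 w 1).foldl (pvInner tokens w serp Y)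
        (pref ++ List.replicate m (0, 0, 0))
    = (pref ++ (PySem.List.pyRange (Y * w) (Y * w + w) 1).map (pvGval tokens w serp))
        ++ List.replicate (m - w.toNat) (0, 0, 0) := by
  have hshift : (PySem.List.pyRange 0 w 1).foldl (pvInner tokens w serp Y)
        (pref ++ List.replicate m (0, 0, 0))
      = (PySem.List.pyRange (Y * w) (Y * w + w) 1).foldl
          (fun o d => if (0 ≤ idx_xy_to_linear (d - Y * w) Y w serp ∧
              idx_xy_to_linear (d - Y * w) Y w serp < (tokens.length : Int)) then
                o.set d.toNat ((PySem.List.pyGet? tokens (idx_xy_to_linear (d - Y * w) Y w serp)).getD (0, 0, 0))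
              else o)
          (pref ++ List.replicate m (0, 0, 0)) := by
    rw [PySem.List.pyRange_one 0 w, PySem.List.pyRange_one (Y * w) (Y * w + w),
        List.foldl_map, List.foldl_map]
    have hlen : (Y * w + w - Y * w).toNat = (w - 0).toNat := by norm_num
    rw [hlen]
    congr 1
    funext o k
    have h1 : Y * w + (k : Int) - Y * w = (0 : Int) + k := by ring
    simp only [pvInner, h1]
    have h2 : Y * w + (0 + (k : Int)) = Y * w + k := by ring
    rw [h2]
  rw [hshift]
  have hb : Y * w + w - Y * w = (w.toNat : Int) := by
    have := Int.toNat_of_nonneg hw.le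
    omega
  have := seq_write
    (fun d => 0 ≤ idx_xy_to_linear (d - Y * w) Y w serp ∧
        idx_xy_to_linear (d - Y * w) Y w serp < (tokens.length : Int))
    (fun d => (PySem.List.pyGet? tokens (idx_xy_to_linear (d - Y * w) Y w serp)).getD (0, 0, 0))
    (0, 0, 0) w.toNat (Y * w) (Y * w + w) (mul_nonneg hY hw.le) hb pref m hl hm
  rw [this]
  congr 1
  congr 1
  apply List.map_congr_left
  intro d hd
  rw [PySem.List.mem_pyRange_one] at hd
  exact gval_row_eq tokens w serp hw Y d hY hd.1 hd.2

-- A's outer loop over the first Y rows fills the first Y*w cells with the gathered values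
lemma rows_eq (tokens : List (Int × Int × Int)) (w h_ : Int) (serp : Bool) (hw : 0 < w) :
    ∀ (Y : Nat), (Y : Int) ≤ h_ →
    (PySem.List.pyRange 0 (Y : Int) 1).foldl
        (fun out y => (PySem.List.pyRange 0 w 1).foldl (pvInner tokens w serp y) out)
        (List.replicate (w * h_).toNat (0, 0, 0))
    = (PySem.List.pyRange 0 ((Y : Int) * w) 1).map (pvGval tokens w serp)
        ++ List.replicate ((w * h_).toNat - Y * w.toNat) (0, 0, 0) := by
  intro Y
  induction Y with
  | zero =>
    intro _
    simp [PySem.List.pyRange_one_eq_nil]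
  | succ Y ih =>
    intro hY
    have hY' : (Y : Int) ≤ h_ := by push_cast at hY ⊢; omega
    have hcast : ((Y + 1 : Nat) : Int) = (Y : Int) + 1 := by push_cast; ring
    rw [hcast, PySem.List.pyRange_one_succ_right (by positivity), List.foldl_append,
        ih hY', List.foldl_cons, List.foldl_nil]
    have hWH : (w * h_).toNat = w.toNat * h_.toNat := by
      rcases (by omega : 0 ≤ h_ ∨ h_ < 0) with hh | hh
      · have h1 : w * h_ = ((w.toNat * h_.toNat : Nat) : Int) := by
          push_cast [Int.toNat_of_nonneg hw.le, Int.toNat_of_nonneg hh]; ring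
        rw [h1, Int.toNat_natCast]
      · have : h_.toNat = 0 := by omega
        have h2 : w * h_ ≤ 0 := mul_nonpos_of_nonneg_of_nonpos hw.le hh.le
        simp [this]
        omega
    have hYh : (Y : Nat) + 1 ≤ h_.toNat := by omega
    have hm : w.toNat ≤ (w * h_).toNat - Y * w.toNat := by
      rw [hWH]
      have : (Y + 1) * w.toNat ≤ h_.toNat * w.toNat := Nat.mul_le_mul_right _ hYh
      have h0 : 0 < w.toNat := by omega
      calc w.toNat ≤ (Y + 1) * w.toNat - Y * w.toNat := by
            rw [Nat.add_mul, Nat.one_mul]; omega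
        _ ≤ w.toNat * h_.toNat - Y * w.toNat := by
            rw [Nat.mul_comm w.toNat h_.toNat]; omega
    have hl : ((PySem.List.pyRange 0 ((Y : Int) * w) 1).map (pvGval tokens w serp)).length
        = ((Y : Int) * w).toNat := by
      simp [PySem.List.length_pyRange_one]
    rw [row_eq tokens w serp hw (Y : Int) (by positivity) _ _ hl hm]
    have happ : PySem.List.pyRange 0 (((Y : Int) + 1) * w) 1
        = PySem.List.pyRange 0 ((Y : Int) * w) 1 ++ PySem.List.pyRange ((Y : Int) * w) ((Y : Int) * w + w) 1 := by
      have h1 : ((Y : Int) + 1) * w = (Y : Int) * w + w := by ring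
      rw [h1]
      exact PySem.List.pyRange_one_append 0 ((Y : Int) * w) ((Y : Int) * w + w)
        (by positivity) (by omega)
    rw [happ, List.map_append]
    have hsucc : (Y + 1) * w.toNat = Y * w.toNat + w.toNat := by ring
    have hrep : (w * h_).toNat - Y * w.toNat - w.toNat = (w * h_).toNat - (Y + 1) * w.toNat := by
      omega
    simp only [List.append_assoc]
    rw [hrep]

-- B's padded strip is the gather of pvPadv over all destination indices
lemma pad_eq (tokens : List (Int × Int × Int)) (wh : Int) (hwh : 0 ≤ wh) :
    PySem.List.slice tokens none (some wh)
      ++ List.replicate (wh - (tokens.length : Int)).toNat (0, 0, 0)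
    = (PySem.List.pyRange 0 wh 1).map (pvPadv tokens) := by
  rw [PySem.List.slice_to tokens hwh, PySem.List.pyRange_one, List.map_map]
  apply List.ext_getElem
  · simp
    omega
  · intro i h1 h2
    simp only [List.length_range, List.length_map] at h2
    have hi : i < (wh - 0).toNat := h2
    by_cases hn : i < tokens.length
    · have hit : i < (tokens.take wh.toNat).length := by simp; omega
      rw [List.getElem_append_left hit, List.getElem_take]
      simp only [List.getElem_map, List.getElem_range, Function.comp]
      simp only [pvPadv]
      rw [if_pos (show ((0:Int) + (i : Nat)) < (tokens.length : Int) by omega)]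
      rw [show ((0:Int) + (i : Nat)) = ((i : Nat) : Int) by omega, PySem.List.pyGet?_natCast]
      simp [List.getElem?_eq_getElem hn]
    · have hit : (tokens.take wh.toNat).length ≤ i := by simp; omega
      rw [List.getElem_append_right hit]
      simp only [List.getElem_replicate, List.getElem_map, List.getElem_range, Function.comp]
      simp only [pvPadv]
      rw [if_neg (show ¬ ((0:Int) + (i : Nat)) < (tokens.length : Int) by omega)]

-- slicing row Y out of the gathered padded strip
lemma row_slice (tokens : List (Int × Int × Int)) (w h_ Y : Int) (hw : 0 < w)
    (hY : 0 ≤ Y) (hYh : Y < h_) :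
    PySem.List.slice ((PySem.List.pyRange 0 (w * h_) 1).map (pvPadv tokens))
        (some (Y * w)) (some ((Y + 1) * w))
    = (PySem.List.pyRange (Y * w) (Y * w + w) 1).map (pvPadv tokens) := by
  have hYw : 0 ≤ Y * w := mul_nonneg hY hw.le
  have hY1w : 0 ≤ (Y + 1) * w := mul_nonneg (by omega) hw.le
  have hle : (Y + 1) * w ≤ w * h_ := by
    have := mul_le_mul_of_nonneg_left (by omega : Y + 1 ≤ h_) hw.le
    calc (Y + 1) * w = w * (Y + 1) := by ring
      _ ≤ w * h_ := this
  have e1 : (Y + 1) * w = Y * w + w := by ring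
  rw [e1] at hle ⊢
  rw [PySem.List.slice_toNat _ hYw (by omega : (0:Int) ≤ Y * w + w)]
  have hwh0 : 0 ≤ w * h_ := mul_nonneg hw.le (by omega)
  apply List.ext_getElem
  · simp [PySem.List.length_pyRange_one]
    omega
  · intro i h1 h2
    simp only [List.length_map, PySem.List.length_pyRange_one] at h2
    have hi : i < w.toNat := by omega
    have hwh : (Y * w).toNat + i < (w * h_).toNat := by omega
    rw [List.getElem_take, List.getElem_drop]
    simp only [List.getElem_map, PySem.List.getElem_pyRange_one]
    congr 1
    have : ((Y * w).toNat : Int) = Y * w := Int.toNat_of_nonneg hYw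
    push_cast [this]
    ring

-- B's row Y (after the optional reversal) is the gather of pvGval over row Y
lemma row_eq_b (tokens : List (Int × Int × Int)) (w Y : Int) (hw : 0 < w) (hY : 0 ≤ Y) :
    (if PySem.Int.mod Y 2 == 1 then
        ((PySem.List.pyRange (Y * w) (Y * w + w) 1).map (pvPadv tokens)).reverse
      else (PySem.List.pyRange (Y * w) (Y * w + w) 1).map (pvPadv tokens))
    = (PySem.List.pyRange (Y * w) (Y * w + w) 1).map (pvGval tokens w true) := by
  by_cases hodd : (PySem.Int.mod Y 2 == 1) = true
  · rw [if_pos hodd]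
    apply List.ext_getElem
    · simp
    · intro i h1 h2
      simp only [List.length_map, PySem.List.length_pyRange_one] at h2
      have hlen : ((PySem.List.pyRange (Y * w) (Y * w + w) 1).map (pvPadv tokens)).length
          = (Y * w + w - Y * w).toNat := by simp [PySem.List.length_pyRange_one]
      have hwn : (Y * w + w - Y * w).toNat = w.toNat := by
        have := Int.toNat_of_nonneg hw.le; omega
      rw [List.getElem_reverse]
      simp only [List.getElem_map, PySem.List.getElem_pyRange_one, hlen, hwn]
      have hd1 : Y * w ≤ Y * w + (i : Int) := by omega
      have hd2 : Y * w + (i : Int) < Y * w + w := by omega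
      rw [gval_eq_padv tokens w true hw Y (Y * w + i) hY hd1 hd2]
      simp only [Bool.true_and, hodd, if_pos]
      congr 1
      have h3 : Y * w + (w - 1 - (Y * w + (i : Int) - Y * w)) = Y * w + (w - 1 - i) := by ring
      rw [h3]
      omega
  · rw [if_neg hodd]
    apply List.map_congr_left
    intro d hd
    rw [PySem.List.mem_pyRange_one] at hd
    rw [gval_eq_padv tokens w true hw Y d hY hd.1 hd.2]
    simp only [Bool.true_and]
    rw [if_neg hodd]

-- B's serpentine foldl over the first Y rows gathers the first Y*w cells
lemma rows_eq_b (tokens : List (Int × Int × Int)) (w h_ : Int) (hw : 0 < w) :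
    ∀ (Y : Nat), (Y : Int) ≤ h_ →
    (PySem.List.pyRange 0 (Y : Int) 1).foldl (fun out y =>
        out ++ (if PySem.Int.mod y 2 == 1 then
            ((PySem.List.pyRange (y * w) (y * w + w) 1).map (pvPadv tokens)).reverse
          else (PySem.List.pyRange (y * w) (y * w + w) 1).map (pvPadv tokens))) []
    = (PySem.List.pyRange 0 ((Y : Int) * w) 1).map (pvGval tokens w true) := by
  intro Y
  induction Y with
  | zero =>
    intro _
    simp [PySem.List.pyRange_one_eq_nil]
  | succ Y ih =>
    intro hY
    have hY' : (Y : Int) ≤ h_ := by push_cast at hY ⊢; omega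
    have hcast : ((Y + 1 : Nat) : Int) = (Y : Int) + 1 := by push_cast; ring
    rw [hcast, PySem.List.pyRange_one_succ_right (by positivity), List.foldl_append,
        ih hY', List.foldl_cons, List.foldl_nil,
        row_eq_b tokens w (Y : Int) hw (by positivity)]
    have happ : PySem.List.pyRange 0 (((Y : Int) + 1) * w) 1
        = PySem.List.pyRange 0 ((Y : Int) * w) 1 ++ PySem.List.pyRange ((Y : Int) * w) ((Y : Int) * w + w) 1 := by
      have h1 : ((Y : Int) + 1) * w = (Y : Int) * w + w := by ring
      rw [h1]
      exact PySem.List.pyRange_one_append 0 ((Y : Int) * w) ((Y : Int) * w + w)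
        (by positivity) (by omega)
    rw [happ, List.map_append]

theorem map_input_to_xy_spec : Claim_equal_map_input_to_xy := by
  intro tokens w h_ input_order wiring _
  unfold Spec_map_input_to_xy
  by_cases hio : (input_order == "xy") = true
  · simp [map_input_to_xy, map_input_to_xy_alt, hio]
  · by_cases hw : w ≤ 0
    · have hnil : PySem.List.pyRange 0 w 1 = [] := PySem.List.pyRange_one_eq_nil hw
      simp [map_input_to_xy, map_input_to_xy_alt, hio, hw, hnil]
    · rw [not_le] at hw
      by_cases hh : h_ ≤ 0
      · have hnil : PySem.List.pyRange 0 h_ 1 = [] := PySem.List.pyRange_one_eq_nil hh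
        have hwh0 : w * h_ ≤ 0 := mul_nonpos_of_nonneg_of_nonpos hw.le hh
        simp [map_input_to_xy, map_input_to_xy_alt, hio, hnil, hh]
      · rw [not_le] at hh
        have hwh : 0 ≤ w * h_ := by positivity
        have hA : map_input_to_xy tokens w h_ input_order wiring
            = (PySem.List.pyRange 0 h_ 1).foldl
                (fun out y => (PySem.List.pyRange 0 w 1).foldl
                    (pvInner tokens w (wiring == "serpentine") y) out)
                (List.replicate (w * h_).toNat (0, 0, 0)) := by
          simp only [map_input_to_xy, hio, Bool.false_eq_true, if_false]
          rfl
        have hYcast : ((h_.toNat : Nat) : Int) = h_ := Int.toNat_of_nonneg hh.le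
        have hArows := rows_eq tokens w h_ (wiring == "serpentine") hw h_.toNat (by omega)
        rw [hYcast] at hArows
        have hWH : (w * h_).toNat = w.toNat * h_.toNat := by
          have h1 : w * h_ = ((w.toNat * h_.toNat : Nat) : Int) := by
            push_cast [Int.toNat_of_nonneg hw.le, Int.toNat_of_nonneg hh.le]; ring
          rw [h1, Int.toNat_natCast]
        have hz : (w * h_).toNat - h_.toNat * w.toNat = 0 := by
          rw [hWH, Nat.mul_comm]; omega
        have hc : h_ * w = w * h_ := by ring
        have hAmap : map_input_to_xy tokens w h_ input_order wiring
            = (PySem.List.pyRange 0 (w * h_) 1).map (pvGval tokens w (wiring == "serpentine")) := by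
          rw [hA, hArows, hz, hc]; simp
        rw [hAmap]
        have hpad := pad_eq tokens (w * h_) hwh
        by_cases hser : (wiring == "serpentine") = true
        · -- serpentine: B cuts the padded strip into rows and reverses odd ones
          simp only [map_input_to_xy_alt, hio, Bool.false_eq_true, if_false,
            if_neg (by omega : ¬ (w ≤ 0 ∨ h_ ≤ 0)), hser, Bool.not_true]
          rw [hpad]
          have hB := rows_eq_b tokens w h_ hw h_.toNat (by omega)
          rw [hYcast] at hB
          have hrw : ∀ (out : List (Int × Int × Int)) (y : Int), 0 ≤ y → y < h_ →
              (out ++ (if PySem.Int.mod y 2 == 1 then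
                  (PySem.List.slice ((PySem.List.pyRange 0 (w * h_) 1).map (pvPadv tokens))
                      (some (y * w)) (some ((y + 1) * w))).reverse
                else PySem.List.slice ((PySem.List.pyRange 0 (w * h_) 1).map (pvPadv tokens))
                      (some (y * w)) (some ((y + 1) * w))))
              = (out ++ (if PySem.Int.mod y 2 == 1 then
                  ((PySem.List.pyRange (y * w) (y * w + w) 1).map (pvPadv tokens)).reverse
                else (PySem.List.pyRange (y * w) (y * w + w) 1).map (pvPadv tokens))) := by
            intro out y hy1 hy2
            rw [row_slice tokens w h_ y hw hy1 hy2]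
          have hfold : (PySem.List.pyRange 0 h_ 1).foldl (fun out y =>
                out ++ (if PySem.Int.mod y 2 == 1 then
                    (PySem.List.slice ((PySem.List.pyRange 0 (w * h_) 1).map (pvPadv tokens))
                        (some (y * w)) (some ((y + 1) * w))).reverse
                  else PySem.List.slice ((PySem.List.pyRange 0 (w * h_) 1).map (pvPadv tokens))
                        (some (y * w)) (some ((y + 1) * w)))) []
              = (PySem.List.pyRange 0 h_ 1).foldl (fun out y =>
                out ++ (if PySem.Int.mod y 2 == 1 then
                    ((PySem.List.pyRange (y * w) (y * w + w) 1).map (pvPadv tokens)).reverse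
                  else (PySem.List.pyRange (y * w) (y * w + w) 1).map (pvPadv tokens))) [] := by
            apply PySem.List.foldl_congr_mem
            intro out y hy
            rw [PySem.List.mem_pyRange_one] at hy
            exact hrw out y hy.1 hy.2
          rw [hc] at hB
          rw [hfold, hB]
        · -- straight wiring: B returns the padded strip itself
          simp only [map_input_to_xy_alt, hio, Bool.false_eq_true, if_false,
            if_neg (by omega : ¬ (w ≤ 0 ∨ h_ ≤ 0)), Bool.not_eq_true'] at *
          simp only [hser]
          simp only [if_pos]
          rw [hpad]
          apply List.map_congr_left
          intro d hd
          rw [PySem.List.mem_pyRange_one] at hd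
          have hY0 : 0 ≤ PySem.Int.floordiv d w := by
            rw [PySem.Int.floordiv_eq_ediv_of_pos hw]
            exact Int.ediv_nonneg hd.1 hw.le
          simp only [pvGval, Bool.false_and, Bool.false_eq_true, if_false, pvPadv]
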